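-- pv_equiv track=rewrite | github.com/Cocoon-Data-Transformation/cocoon | cocoon_data/workflow.py | find_final_node
-- ===== SOURCE A (Python) =====
-- def find_final_node(steps, edges):
--
--     node_set = set(range(len(steps)))
--
--     nodes_with_no_outgoing = {node for node, targets in edges.items() if len(targets) == 0}
--
--     nodes_not_in_edges = node_set - set(edges.keys())
--
--     potential_final_nodes = nodes_with_no_outgoing.union(nodes_not_in_edges)
--
--     if len(potential_final_nodes) != 1:
--         return None
--
--     final_node = potential_final_nodes.pop()
--
--     for node in node_set:
--         if node == final_node:
--             continue
--         if not find_path(edges, node, final_node):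
--             return None
--
--     return final_node
--
-- def find_path(edges, start, end, visited=None):
--     if visited is None:
--         visited = set()
--
--     if start == end:
--         return True
--     if start in visited:
--         return False
--
--     visited.add(start)
--
--     for neighbor in edges.get(start, []):
--         if find_path(edges, neighbor, end, visited):
--             return True
--
--     return False
-- ===== SOURCE B (Python) =====
-- def find_final_node(steps, edges):
--     candidates = {node for node, targets in edges.items() if not targets}
--     for node in range(len(steps)):
--         if node not in edges:
--             candidates.add(node)
--     if len(candidates) != 1:
--         return None
--     (final,) = candidates
--     reach = {final}
--     for _ in range(len(edges)):
--         changed = False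
--         for node, targets in edges.items():
--             if node not in reach and any(t in reach for t in targets):
--                 reach.add(node)
--                 changed = True
--         if not changed:
--             break
--     if all(node in reach for node in range(len(steps))):
--         return final
--     return None
-- ===== Notes on version B (the rewrite author's own statement) =====
-- stated objective: alternative
-- what changed: A runs a fresh recursive DFS from every node to test reachability of the sink; B instead computes the set of nodes that can reach the candidate sink once, by a monotone backward fixpoint iteration over the edge list (rounds until no change), then checks all nodes are in that set.
import Mathlib
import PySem

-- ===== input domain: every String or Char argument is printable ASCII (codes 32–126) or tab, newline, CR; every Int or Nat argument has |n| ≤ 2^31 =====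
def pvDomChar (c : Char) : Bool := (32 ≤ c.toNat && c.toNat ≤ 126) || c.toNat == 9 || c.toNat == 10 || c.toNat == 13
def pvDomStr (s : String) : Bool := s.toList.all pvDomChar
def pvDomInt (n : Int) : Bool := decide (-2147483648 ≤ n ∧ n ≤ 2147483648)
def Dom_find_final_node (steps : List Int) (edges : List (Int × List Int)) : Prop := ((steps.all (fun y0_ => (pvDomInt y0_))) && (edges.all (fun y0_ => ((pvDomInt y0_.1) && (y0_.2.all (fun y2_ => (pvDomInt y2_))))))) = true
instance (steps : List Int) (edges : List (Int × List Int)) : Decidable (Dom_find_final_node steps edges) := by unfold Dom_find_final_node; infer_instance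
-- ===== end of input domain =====

-- B replaces A's per-node recursive DFS reachability tests by ONE backward fixpoint iteration
-- over the edge list computing the set of nodes that can reach the candidate sink (alternative
-- algorithm, similar asymptotic cost).


-- ===== PORT A =====
-- find_path, with a fuel argument as a totality guard only: the Python recursion terminates
-- because `visited` grows at every nested call; find_final_node supplies fuel that is proved
-- sufficient (fp_false_spec below), so the fuel-0 branch is never reached on admitted inputs.
def fp (edges : PySem.Dict Int (List Int)) (endN : Int) : Nat → Int → PySem.Set Int → Bool × PySem.Set Int
  | 0, _, visited => (false, visited)
  | fuel+1, start, visited =>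
    if start = endN then (true, visited)
    else if PySem.Set.contains visited start then (false, visited)
    else
      -- for neighbor in edges.get(start, []): if find_path(...): return True  — early-exit fold
      (PySem.Dict.getD edges start []).foldl
        (fun st n => if st.1 then st else fp edges endN fuel n st.2)
        (false, PySem.Set.add visited start)

-- the 'for node in node_set' loop with its early 'return None'
def a_check (edges : List (Int × List Int)) (final : Int) (fuel : Nat) : List Int → Option Int
  | [] => some final
  | node :: rest =>
    if node = final then a_check edges final fuel rest
    else if (fp (PySem.Dict.mk edges) final fuel node PySem.Set.empty).1 then a_check edges final fuel rest
    else none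

def find_final_node (steps : List Int) (edges : List (Int × List Int)) : Option Int :=
  let d := PySem.Dict.mk edges
  let node_set : PySem.Set Int := PySem.Set.ofList (PySem.List.pyRange 0 steps.length 1)
  let nodes_with_no_outgoing : PySem.Set Int :=
    PySem.Set.ofList ((d.items.filter (fun p => p.2.length == 0)).map Prod.fst)
  let nodes_not_in_edges : PySem.Set Int := PySem.Set.diff node_set (PySem.Set.ofList d.keys)
  let potential := PySem.Set.union nodes_with_no_outgoing nodes_not_in_edges
  if PySem.Set.len potential ≠ 1 then none
  else a_check edges potential.headI ((edges.flatMap Prod.snd).length + 2) node_set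
  -- potential.headI = set.pop() on the singleton set (the unique element)

-- ===== PORT B =====
-- one round of the backward fixpoint: for node, targets in edges.items(): ...
def bRound (edges : List (Int × List Int)) (st : PySem.Set Int × Bool) : PySem.Set Int × Bool :=
  edges.foldl
    (fun st p =>
      if !PySem.Set.contains st.1 p.1 && p.2.any (fun t => PySem.Set.contains st.1 t) then
        (PySem.Set.add st.1 p.1, true)
      else st)
    st

-- for _ in range(len(edges)): ... if not changed: break
def bLoop (edges : List (Int × List Int)) : Nat → PySem.Set Int → PySem.Set Int
  | 0, reach => reach
  | k+1, reach =>
    let st := bRound edges (reach, false)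
    if st.2 then bLoop edges k st.1 else st.1

def find_final_node_alt (steps : List Int) (edges : List (Int × List Int)) : Option Int :=
  let d := PySem.Dict.mk edges
  let candidates0 : PySem.Set Int :=
    PySem.Set.ofList ((d.items.filter (fun p => p.2.isEmpty)).map Prod.fst)
  let candidates := (PySem.List.pyRange 0 steps.length 1).foldl
      (fun c node => if d.contains node then c else PySem.Set.add c node) candidates0
  if PySem.Set.len candidates ≠ 1 then none
  else
    let final := candidates.headI   -- (final,) = candidates
    let reach := bLoop edges edges.length (PySem.Set.ofList [final])
    if (PySem.List.pyRange 0 steps.length 1).all (fun node => PySem.Set.contains reach node) then some final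
    else none

-- ===== PRECONDITION & SPEC =====
-- Pre_ excludes association lists with duplicate keys, which do not represent any Python dict
-- (the `edges` parameter is a dict in Python, so its key list is always duplicate-free).
def Pre_find_final_node (steps : List Int) (edges : List (Int × List Int)) : Prop :=
  (edges.map Prod.fst).Nodup
instance (steps : List Int) (edges : List (Int × List Int)) : Decidable (Pre_find_final_node steps edges) := by
  unfold Pre_find_final_node; infer_instance

def pvWitness_find_final_node : List Int × (List (Int × List Int)) :=
  ([0, 1], [(0, [1]), (1, [])])

def Spec_find_final_node (steps : List Int) (edges : List (Int × List Int)) (out : Option Int) : Prop := out = find_final_node_alt steps edges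
instance (steps : List Int) (edges : List (Int × List Int)) (out : Option Int) : Decidable (Spec_find_final_node steps edges out) := by unfold Spec_find_final_node; infer_instance

-- ===== CLAIM (what is proved, stated in full; the proofs are below) =====
def Claim_equal_find_final_node : Prop := ∀ (steps : List Int) (edges : List (Int × List Int)), Dom_find_final_node steps edges → Pre_find_final_node steps edges → Spec_find_final_node steps edges (find_final_node steps edges)

-- ===== LEMMAS AND PROOFS =====

-- the step relation of the graph (one edge), and "u can reach t"
def DStep (e : PySem.Dict Int (List Int)) (u v : Int) : Prop :=
  v ∈ PySem.Dict.getD e u []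

def Reaches (edges : List (Int × List Int)) (u t : Int) : Prop :=
  Relation.ReflTransGen (DStep (PySem.Dict.mk edges)) u t

-- dict lookup on a literal dict finds a member pair
theorem get?_mk_mem : ∀ (l : List (Int × List Int)) (u : Int) (ts : List Int),
    (PySem.Dict.mk l).get? u = some ts → (u, ts) ∈ l := by
  intro l
  induction l with
  | nil => intro u ts h; simp [PySem.Dict.get?] at h
  | cons p rest ih =>
    intro u ts h
    rw [show (p : Int × List Int) = (p.1, p.2) from rfl] at h
    rw [PySem.Dict.get?_mk_cons] at h
    by_cases hk : p.1 == u
    · simp [hk] at h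
      have : p.1 = u := by simpa using hk
      subst this
      have : ts = p.2 := by simpa using h.symm
      subst this
      exact List.mem_cons_self
    · simp [hk] at h
      right; exact ih u ts h

theorem dstep_mem_flatMap (l : List (Int × List Int)) (u v : Int)
    (h : DStep (PySem.Dict.mk l) u v) : v ∈ l.flatMap Prod.snd := by
  unfold DStep at h
  rw [PySem.Dict.getD_eq_get?_getD] at h
  cases hg : (PySem.Dict.mk l).get? u with
  | none => rw [hg] at h; simp at h
  | some ts =>
    rw [hg] at h; simp at h
    exact List.mem_flatMap.mpr ⟨(u, ts), get?_mk_mem l u ts hg, h⟩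

-- once the early-exit flag is true, fp's neighbor fold is the identity
theorem fp_loop_true (e : PySem.Dict Int (List Int)) (t : Int) (fuel : Nat) :
    ∀ (ns : List Int) (v : PySem.Set Int),
      ns.foldl (fun st n => if st.1 then st else fp e t fuel n st.2) (true, v) = (true, v) := by
  intro ns
  induction ns with
  | nil => intro v; rfl
  | cons n rest ih => intro v; simpa using ih v

-- the invariant established for one call of A's recursive DFS
def FPInv (e : PySem.Dict Int (List Int)) (t : Int) (fuel : Nat) (start : Int) (vis : PySem.Set Int) : Prop :=
  (∀ x ∈ vis, x ∈ (fp e t fuel start vis).2) ∧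
  (fp e t fuel start vis).2.Nodup ∧
  ((fp e t fuel start vis).1 = true → Relation.ReflTransGen (DStep e) start t) ∧
  ((fp e t fuel start vis).1 = false →
    start ∈ (fp e t fuel start vis).2 ∧
    ∀ x ∈ (fp e t fuel start vis).2, x ∉ vis →
      x ≠ t ∧ ∀ y, DStep e x y → y ∈ (fp e t fuel start vis).2)

-- the neighbor fold of fp, assuming the invariant at the current fuel
theorem fp_loop (e : PySem.Dict Int (List Int)) (t : Int) (U : Finset Int) (fuel : Nat)
    (IH : ∀ (start : Int) (vis : PySem.Set Int), start ∈ U → vis.Nodup →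
      (U \ vis.toFinset).card + 1 ≤ fuel → FPInv e t fuel start vis) :
    ∀ (ns : List Int) (vis : PySem.Set Int), (∀ n ∈ ns, n ∈ U) → vis.Nodup →
      (U \ vis.toFinset).card + 1 ≤ fuel →
      (∀ x ∈ vis, x ∈ (ns.foldl (fun st n => if st.1 then st else fp e t fuel n st.2) (false, vis)).2) ∧
      (ns.foldl (fun st n => if st.1 then st else fp e t fuel n st.2) (false, vis)).2.Nodup ∧
      ((ns.foldl (fun st n => if st.1 then st else fp e t fuel n st.2) (false, vis)).1 = true →
        ∃ n ∈ ns, Relation.ReflTransGen (DStep e) n t) ∧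
      ((ns.foldl (fun st n => if st.1 then st else fp e t fuel n st.2) (false, vis)).1 = false →
        (∀ n ∈ ns, n ∈ (ns.foldl (fun st n => if st.1 then st else fp e t fuel n st.2) (false, vis)).2) ∧
        ∀ x ∈ (ns.foldl (fun st n => if st.1 then st else fp e t fuel n st.2) (false, vis)).2, x ∉ vis →
          x ≠ t ∧ ∀ y, DStep e x y → y ∈ (ns.foldl (fun st n => if st.1 then st else fp e t fuel n st.2) (false, vis)).2) := by
  intro ns
  induction ns with
  | nil =>
    intro vis _ hnd _
    refine ⟨fun x hx => hx, hnd, by simp, fun _ => ⟨by simp, fun x hx hnx => absurd hx hnx⟩⟩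
  | cons n rest ih =>
    intro vis hns hnd hcard
    have hInv := IH n vis (hns n List.mem_cons_self) hnd hcard
    rcases hInv with ⟨h1, h2, h3, h4⟩
    have hstep : (List.foldl (fun st n => if st.1 then st else fp e t fuel n st.2) (false, vis) (n :: rest)) =
        (List.foldl (fun st n => if st.1 then st else fp e t fuel n st.2) (fp e t fuel n vis) rest) := by
      simp
    rw [hstep]
    cases hb : (fp e t fuel n vis).1 with
    | true =>
      have hfp : fp e t fuel n vis = (true, (fp e t fuel n vis).2) := by
        rw [← hb]
      rw [hfp, fp_loop_true]
      refine ⟨h1, h2, fun _ => ⟨n, List.mem_cons_self, h3 hb⟩, fun h => by simp at h⟩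
    | false =>
      have hsub : vis.toFinset ⊆ (fp e t fuel n vis).2.toFinset := by
        intro x hx
        simp only [List.mem_toFinset] at hx ⊢
        exact h1 x hx
      have hcard2 : (U \ (fp e t fuel n vis).2.toFinset).card + 1 ≤ fuel := by
        have := Finset.card_le_card (Finset.sdiff_subset_sdiff (Finset.Subset.refl U) hsub)
        omega
      have hfp : fp e t fuel n vis = (false, (fp e t fuel n vis).2) := by
        rw [← hb]
      have lih := ih (fp e t fuel n vis).2 (fun m hm => hns m (List.mem_cons_of_mem _ hm)) h2 hcard2
      rw [hfp]
      rcases lih with ⟨l1, l2, l3, l4⟩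
      refine ⟨fun x hx => l1 x (h1 x hx), l2, ?_, ?_⟩
      · intro hr
        obtain ⟨m, hm, hmre⟩ := l3 hr
        exact ⟨m, List.mem_cons_of_mem _ hm, hmre⟩
      · intro hr
        obtain ⟨lmem, lclo⟩ := l4 hr
        have hn2 := (h4 hb).1
        constructor
        · intro m hm
          rcases List.mem_cons.mp hm with rfl | hm'
          · exact l1 m hn2
          · exact lmem m hm'
        · intro x hx hxv
          by_cases hx1 : x ∈ (fp e t fuel n vis).2
          · obtain ⟨hxt, hxc⟩ := (h4 hb).2 x hx1 hxv
            exact ⟨hxt, fun y hy => l1 y (hxc y hy)⟩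
          · exact lclo x hx hx1

-- the main invariant of A's recursive DFS, by induction on the fuel
theorem fp_main (e : PySem.Dict Int (List Int)) (t : Int) (U : Finset Int)
    (hU : ∀ u v, DStep e u v → v ∈ U) :
    ∀ (fuel : Nat) (start : Int) (vis : PySem.Set Int), start ∈ U → vis.Nodup →
      (U \ vis.toFinset).card + 1 ≤ fuel → FPInv e t fuel start vis := by
  intro fuel
  induction fuel with
  | zero => intro start vis _ _ h; omega
  | succ fuel ih =>
    intro start vis hsU hnd hcard
    unfold FPInv
    by_cases hst : start = t
    · simp only [fp, if_pos hst]
      exact ⟨fun x hx => hx, hnd, fun _ => hst ▸ Relation.ReflTransGen.refl, fun h => by simp at h⟩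
    · by_cases hvc : PySem.Set.contains vis start
      · simp only [fp, if_neg hst, if_pos hvc]
        exact ⟨fun x hx => hx, hnd, fun h => by simp at h,
          fun _ => ⟨(PySem.Set.contains_iff vis start).mp hvc, fun x hx hnx => absurd hx hnx⟩⟩
      · have hsv : start ∉ vis := fun h => hvc ((PySem.Set.contains_iff vis start).mpr h)
        have hadd : PySem.Set.add vis start = vis ++ [start] := PySem.Set.add_of_not_mem hsv
        have hnd1 : (PySem.Set.add vis start).Nodup := PySem.Set.nodup_add vis start hnd
        have htf : (PySem.Set.add vis start).toFinset = insert start vis.toFinset := by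
          rw [hadd]
          simp [List.toFinset_append]
        have hmemsd : start ∈ U \ vis.toFinset := by
          simp only [Finset.mem_sdiff, List.mem_toFinset]
          exact ⟨hsU, hsv⟩
        have hcard1 : (U \ (PySem.Set.add vis start).toFinset).card + 1 ≤ fuel := by
          rw [htf, Finset.sdiff_insert]
          have h1 := Finset.card_erase_of_mem hmemsd
          have h2 : 0 < (U \ vis.toFinset).card := Finset.card_pos.mpr ⟨start, hmemsd⟩
          omega
        have hns : ∀ n ∈ PySem.Dict.getD e start [], n ∈ U := fun n hn => hU start n hn
        have L := fp_loop e t U fuel ih (PySem.Dict.getD e start []) (PySem.Set.add vis start) hns hnd1 hcard1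
        rcases L with ⟨L1, L2, L3, L4⟩
        have hred : fp e t (fuel+1) start vis =
            (PySem.Dict.getD e start []).foldl (fun st n => if st.1 then st else fp e t fuel n st.2)
              (false, PySem.Set.add vis start) := by
          simp only [fp, if_neg hst, if_neg hvc]
        rw [hred]
        refine ⟨fun x hx => L1 x (by rw [hadd]; exact List.mem_append_left _ hx), L2, ?_, ?_⟩
        · intro hr
          obtain ⟨n, hn, hnre⟩ := L3 hr
          exact Relation.ReflTransGen.head hn hnre
        · intro hr
          refine ⟨L1 start (by rw [hadd]; simp), ?_⟩
          intro x hx hxv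
          by_cases hx1 : x ∈ PySem.Set.add vis start
          · have hxs : x = start := by
              rw [hadd] at hx1
              rcases List.mem_append.mp hx1 with h | h
              · exact absurd h hxv
              · simpa using h
            subst hxs
            exact ⟨hst, fun y hy => (L4 hr).1 y hy⟩
          · exact (L4 hr).2 x hx hx1

-- with the fuel find_final_node supplies, find_path decides reachability
theorem fp_true_iff (edges : List (Int × List Int)) (t start : Int) :
    (fp (PySem.Dict.mk edges) t ((edges.flatMap Prod.snd).length + 2) start PySem.Set.empty).1 = true
      ↔ Reaches edges start t := by
  have hU : ∀ u v, DStep (PySem.Dict.mk edges) u v → v ∈ insert start (edges.flatMap Prod.snd).toFinset := by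
    intro u v h
    exact Finset.mem_insert_of_mem (List.mem_toFinset.mpr (dstep_mem_flatMap edges u v h))
  have hcard : ((insert start (edges.flatMap Prod.snd).toFinset) \ (PySem.Set.empty : PySem.Set Int).toFinset).card + 1
      ≤ (edges.flatMap Prod.snd).length + 2 := by
    have h1 : ((insert start (edges.flatMap Prod.snd).toFinset) \ (PySem.Set.empty : PySem.Set Int).toFinset).card
        ≤ (insert start (edges.flatMap Prod.snd).toFinset).card := Finset.card_le_card (Finset.sdiff_subset)
    have h2 : (insert start (edges.flatMap Prod.snd).toFinset).card ≤ (edges.flatMap Prod.snd).toFinset.card + 1 :=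
      Finset.card_insert_le _ _
    have h3 := (edges.flatMap Prod.snd).toFinset_card_le
    omega
  have hinv := fp_main (PySem.Dict.mk edges) t (insert start (edges.flatMap Prod.snd).toFinset) hU
    ((edges.flatMap Prod.snd).length + 2) start PySem.Set.empty (Finset.mem_insert_self _ _)
    List.nodup_nil hcard
  rcases hinv with ⟨_, _, h3, h4⟩
  constructor
  · exact h3
  · intro hre
    by_contra hb
    have hb' : (fp (PySem.Dict.mk edges) t ((edges.flatMap Prod.snd).length + 2) start PySem.Set.empty).1 = false := by
      cases h : (fp (PySem.Dict.mk edges) t ((edges.flatMap Prod.snd).length + 2) start PySem.Set.empty).1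
      · rfl
      · exact absurd h hb
    obtain ⟨hstart, hclo⟩ := h4 hb'
    have key : ∀ z, Relation.ReflTransGen (DStep (PySem.Dict.mk edges)) z t →
        z ∉ (fp (PySem.Dict.mk edges) t ((edges.flatMap Prod.snd).length + 2) start PySem.Set.empty).2 := by
      intro z hz
      induction hz using Relation.ReflTransGen.head_induction_on with
      | refl => intro ht; exact (hclo t ht (List.not_mem_nil)).1 rfl
      | head hab _ ihb => intro ha; exact ihb ((hclo _ ha (List.not_mem_nil)).2 _ hab)
    exact key start hre hstart

-- B-side: one bRound fold; the `changed` flag is monotone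
theorem bstep_flag_mono : ∀ (l : List (Int × List Int)) (v : PySem.Set Int),
    (l.foldl (fun st p =>
      if !PySem.Set.contains st.1 p.1 && p.2.any (fun t => PySem.Set.contains st.1 t) then
        (PySem.Set.add st.1 p.1, true) else st) ((v, true) : PySem.Set Int × Bool)).2 = true := by
  intro l
  induction l with
  | nil => intro v; rfl
  | cons p rest ih =>
    intro v
    simp only [List.foldl_cons]
    split
    · exact ih _
    · exact ih v

-- monotonicity / nodup / provenance / length for the bRound fold
theorem bstep_mono : ∀ (l : List (Int × List Int)) (st : PySem.Set Int × Bool), st.1.Nodup →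
    (∀ x ∈ st.1, x ∈ (bRound l st).1) ∧ (bRound l st).1.Nodup ∧
    (∀ x ∈ (bRound l st).1, x ∈ st.1 ∨ x ∈ l.map Prod.fst) ∧
    st.1.length ≤ (bRound l st).1.length := by
  intro l
  induction l with
  | nil =>
    intro st hst
    exact ⟨fun x hx => hx, hst, fun x hx => Or.inl hx, le_refl _⟩
  | cons p rest ih =>
    intro st hst
    rw [show bRound (p :: rest) st = bRound rest
        (if (!PySem.Set.contains st.1 p.1 && p.2.any fun t => PySem.Set.contains st.1 t) then
          (PySem.Set.add st.1 p.1, true) else st) from rfl]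
    by_cases hc : (!PySem.Set.contains st.1 p.1 && p.2.any fun t => PySem.Set.contains st.1 t) = true
    · rw [if_pos hc]
      have hps : p.1 ∉ st.1 := by
        obtain ⟨hnc, _⟩ := (Bool.and_eq_true _ _).mp hc
        intro hmem
        rw [(PySem.Set.contains_iff st.1 p.1).mpr hmem] at hnc
        simp at hnc
      have hnd' : (PySem.Set.add st.1 p.1).Nodup := PySem.Set.nodup_add st.1 p.1 hst
      have hlen : (PySem.Set.add st.1 p.1).length = st.1.length + 1 := by
        rw [PySem.Set.add_of_not_mem hps]; simp
      obtain ⟨i1, i2, i3, i4⟩ := ih (PySem.Set.add st.1 p.1, true) hnd'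
      refine ⟨?_, i2, ?_, ?_⟩
      · intro x hx
        exact i1 x ((PySem.Set.mem_add st.1 p.1 x).mpr (Or.inl hx))
      · intro x hx
        rcases i3 x hx with h | h
        · rcases (PySem.Set.mem_add st.1 p.1 x).mp h with h' | h'
          · exact Or.inl h'
          · exact Or.inr (by simp [h'])
        · exact Or.inr (List.mem_cons_of_mem _ h)
      · simp only at i4; omega
    · rw [if_neg hc]
      obtain ⟨i1, i2, i3, i4⟩ := ih st hst
      exact ⟨i1, i2, fun x hx => (i3 x hx).imp id (List.mem_cons_of_mem _), i4⟩

-- if the round reports no change, nothing was added and the set is stable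
theorem bstep_nochange : ∀ (l : List (Int × List Int)) (r : PySem.Set Int),
    (bRound l (r, false)).2 = false →
    (bRound l (r, false)).1 = r ∧
    ∀ p ∈ l, (p.2.any (fun t => PySem.Set.contains r t)) = true → p.1 ∈ r := by
  intro l
  induction l with
  | nil => intro r _; exact ⟨rfl, by simp⟩
  | cons p rest ih =>
    intro r hflag
    rw [show bRound (p :: rest) (r, false) = bRound rest
        (if (!PySem.Set.contains r p.1 && p.2.any fun t => PySem.Set.contains r t) then
          (PySem.Set.add r p.1, true) else (r, false)) from rfl] at hflag ⊢
    by_cases hc : (!PySem.Set.contains r p.1 && p.2.any fun t => PySem.Set.contains r t) = true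
    · exfalso
      rw [if_pos hc] at hflag
      have := bstep_flag_mono rest (PySem.Set.add r p.1)
      rw [show bRound rest (PySem.Set.add r p.1, true) =
          rest.foldl (fun st p =>
            if !PySem.Set.contains st.1 p.1 && p.2.any (fun t => PySem.Set.contains st.1 t) then
              (PySem.Set.add st.1 p.1, true) else st) (PySem.Set.add r p.1, true) from rfl] at hflag
      rw [this] at hflag
      simp at hflag
    · rw [if_neg hc] at hflag ⊢
      obtain ⟨h1, h2⟩ := ih r hflag
      refine ⟨h1, ?_⟩
      intro q hq hany
      rcases List.mem_cons.mp hq with rfl | hq'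
      · by_cases hmem : q.1 ∈ r
        · exact hmem
        · exfalso
          apply hc
          have hcf : PySem.Set.contains r q.1 = false := by
            cases h : PySem.Set.contains r q.1
            · rfl
            · exact absurd ((PySem.Set.contains_iff r q.1).mp h) hmem
          rw [hcf, hany]
          rfl
      · exact h2 q hq' hany

-- if the round reports a change, the set strictly grew
theorem bstep_growth : ∀ (l : List (Int × List Int)) (r : PySem.Set Int), r.Nodup →
    (bRound l (r, false)).2 = true → r.length < (bRound l (r, false)).1.length := by
  intro l
  induction l with
  | nil => intro r _ h; simp [bRound] at h
  | cons p rest ih =>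
    intro r hnd hflag
    rw [show bRound (p :: rest) (r, false) = bRound rest
        (if (!PySem.Set.contains r p.1 && p.2.any fun t => PySem.Set.contains r t) then
          (PySem.Set.add r p.1, true) else (r, false)) from rfl] at hflag ⊢
    by_cases hc : (!PySem.Set.contains r p.1 && p.2.any fun t => PySem.Set.contains r t) = true
    · rw [if_pos hc]
      have hps : p.1 ∉ r := by
        obtain ⟨hnc, _⟩ := (Bool.and_eq_true _ _).mp hc
        intro hmem
        rw [(PySem.Set.contains_iff r p.1).mpr hmem] at hnc
        simp at hnc
      have hlen : (PySem.Set.add r p.1).length = r.length + 1 := by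
        rw [PySem.Set.add_of_not_mem hps]; simp
      have hnd' : (PySem.Set.add r p.1).Nodup := PySem.Set.nodup_add r p.1 hnd
      have := (bstep_mono rest (PySem.Set.add r p.1, true) hnd').2.2.2
      simp only at this
      omega
    · rw [if_neg hc] at hflag ⊢
      exact ih r hnd hflag

-- everything bRound adds can reach t (keys of edges duplicate-free)
theorem bstep_sound (edges : List (Int × List Int)) (hnd : (edges.map Prod.fst).Nodup) (t : Int) :
    ∀ (l : List (Int × List Int)), (∀ p ∈ l, p ∈ edges) →
    ∀ (st : PySem.Set Int × Bool), (∀ v ∈ st.1, Reaches edges v t) →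
    ∀ v ∈ (l.foldl (fun st p =>
      if !PySem.Set.contains st.1 p.1 && p.2.any (fun t => PySem.Set.contains st.1 t) then
        (PySem.Set.add st.1 p.1, true) else st) st).1, Reaches edges v t := by
  intro l
  induction l with
  | nil => intro _ st hst v hv; exact hst v hv
  | cons p rest ih =>
    intro hsub st hst
    simp only [List.foldl_cons]
    by_cases hc : (!PySem.Set.contains st.1 p.1 && p.2.any fun t => PySem.Set.contains st.1 t) = true
    · rw [if_pos hc]
      apply ih (fun q hq => hsub q (List.mem_cons_of_mem _ hq))
      intro v hv
      rcases (PySem.Set.mem_add st.1 p.1 v).mp hv with h | h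
      · exact hst v h
      · subst h
        obtain ⟨_, hany⟩ := (Bool.and_eq_true _ _).mp hc
        obtain ⟨tt, htt, httc⟩ := List.any_eq_true.mp hany
        have httm : tt ∈ st.1 := (PySem.Set.contains_iff st.1 tt).mp httc
        have hget : (PySem.Dict.mk edges).get? p.1 = some p.2 := by
          apply PySem.Dict.get?_of_mem_items (PySem.Dict.mk edges)
            (show (p.1, p.2) ∈ (PySem.Dict.mk edges).items from hsub p List.mem_cons_self)
          rw [PySem.Dict.keys_mk]
          exact hnd
        have hstep : DStep (PySem.Dict.mk edges) p.1 tt := by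
          unfold DStep
          rw [PySem.Dict.getD_of_get?_eq_some _ _ hget]
          exact htt
        exact Relation.ReflTransGen.head hstep (hst tt httm)
    · rw [if_neg hc]
      exact ih (fun q hq => hsub q (List.mem_cons_of_mem _ hq)) st hst

theorem bLoop_succ (edges : List (Int × List Int)) (k : Nat) (r : PySem.Set Int) :
    bLoop edges (k+1) r = if (bRound edges (r, false)).2 then bLoop edges k (bRound edges (r, false)).1
      else (bRound edges (r, false)).1 := rfl

theorem bLoop_sound (edges : List (Int × List Int)) (hnd : (edges.map Prod.fst).Nodup) (t : Int) :
    ∀ (k : Nat) (r : PySem.Set Int), (∀ v ∈ r, Reaches edges v t) →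
    ∀ v ∈ bLoop edges k r, Reaches edges v t := by
  intro k
  induction k with
  | zero => intro r hr; exact hr
  | succ k ih =>
    intro r hr
    rw [bLoop_succ]
    have hround : ∀ v ∈ (bRound edges (r, false)).1, Reaches edges v t :=
      bstep_sound edges hnd t edges (fun p hp => hp) (r, false) hr
    by_cases hf : (bRound edges (r, false)).2 = true
    · rw [if_pos hf]
      exact ih _ hround
    · rw [if_neg hf]
      exact hround

theorem bLoop_mono (edges : List (Int × List Int)) :
    ∀ (k : Nat) (r : PySem.Set Int), r.Nodup →
      (∀ x ∈ r, x ∈ bLoop edges k r) ∧ (bLoop edges k r).Nodup := by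
  intro k
  induction k with
  | zero => intro r hr; exact ⟨fun x hx => hx, hr⟩
  | succ k ih =>
    intro r hr
    rw [bLoop_succ]
    obtain ⟨m1, m2, _, _⟩ := bstep_mono edges (r, false) hr
    by_cases hf : (bRound edges (r, false)).2 = true
    · rw [if_pos hf]
      obtain ⟨l1, l2⟩ := ih (bRound edges (r, false)).1 m2
      exact ⟨fun x hx => l1 x (m1 x hx), l2⟩
    · rw [if_neg hf]
      exact ⟨m1, m2⟩

-- after the loop the set is stable: any node with a target inside is inside
theorem bLoop_stable (edges : List (Int × List Int)) :
    ∀ (k : Nat) (r : PySem.Set Int), r.Nodup →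
      ((edges.map Prod.fst).toFinset).card ≤ k + (r.toFinset ∩ (edges.map Prod.fst).toFinset).card →
      ∀ p ∈ edges, (∃ tt ∈ p.2, tt ∈ bLoop edges k r) → p.1 ∈ bLoop edges k r := by
  intro k
  induction k with
  | zero =>
    intro r hr hcard
    have hsub : r.toFinset ∩ (edges.map Prod.fst).toFinset ⊆ (edges.map Prod.fst).toFinset :=
      Finset.inter_subset_right
    have heq := Finset.eq_of_subset_of_card_le hsub (by omega)
    intro p hp _
    have hk : p.1 ∈ (edges.map Prod.fst).toFinset := by
      simp only [List.mem_toFinset, List.mem_map]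
      exact ⟨p, hp, rfl⟩
    rw [← heq] at hk
    have := Finset.mem_inter.mp hk
    exact List.mem_toFinset.mp this.1
  | succ k ih =>
    intro r hr hcard
    rw [bLoop_succ]
    obtain ⟨m1, m2, m3, _⟩ := bstep_mono edges (r, false) hr
    by_cases hf : (bRound edges (r, false)).2 = true
    · rw [if_pos hf]
      apply ih (bRound edges (r, false)).1 m2
      -- the round strictly grew the set, by a new element drawn from the keys
      have hgrow := bstep_growth edges r hr hf
      have hex : ∃ x ∈ (bRound edges (r, false)).1, x ∉ r := by
        by_contra hall
        push_neg at hall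
        have hsub : (bRound edges (r, false)).1.toFinset ⊆ r.toFinset := by
          intro x hx
          exact List.mem_toFinset.mpr (hall x (List.mem_toFinset.mp hx))
        have hc1 := Finset.card_le_card hsub
        rw [List.toFinset_card_of_nodup m2, List.toFinset_card_of_nodup hr] at hc1
        omega
      obtain ⟨x, hx1, hx2⟩ := hex
      have hxk : x ∈ (edges.map Prod.fst).toFinset := by
        rcases m3 x hx1 with h | h
        · exact absurd h hx2
        · exact List.mem_toFinset.mpr h
      have hins : insert x (r.toFinset ∩ (edges.map Prod.fst).toFinset) ⊆
          (bRound edges (r, false)).1.toFinset ∩ (edges.map Prod.fst).toFinset := by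
        intro y hy
        rcases Finset.mem_insert.mp hy with rfl | hy'
        · exact Finset.mem_inter.mpr ⟨List.mem_toFinset.mpr hx1, hxk⟩
        · have := Finset.mem_inter.mp hy'
          exact Finset.mem_inter.mpr ⟨List.mem_toFinset.mpr (m1 _ (List.mem_toFinset.mp this.1)), this.2⟩
      have hxnot : x ∉ r.toFinset ∩ (edges.map Prod.fst).toFinset := by
        intro h
        exact hx2 (List.mem_toFinset.mp (Finset.mem_inter.mp h).1)
      have hcard2 := Finset.card_le_card hins
      rw [Finset.card_insert_of_notMem hxnot] at hcard2
      omega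
    · rw [if_neg hf]
      obtain ⟨heq, hstab⟩ := bstep_nochange edges r (by simpa using hf)
      rw [heq]
      intro p hp ⟨tt, htt1, htt2⟩
      apply hstab p hp
      exact List.any_eq_true.mpr ⟨tt, htt1, (PySem.Set.contains_iff r tt).mpr htt2⟩

-- a stable set containing t contains every node that reaches t
theorem stable_complete (edges : List (Int × List Int)) (t : Int) (S : PySem.Set Int)
    (hstab : ∀ p ∈ edges, (∃ tt ∈ p.2, tt ∈ S) → p.1 ∈ S) (ht : t ∈ S) :
    ∀ u, Reaches edges u t → u ∈ S := by
  intro u hre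
  induction hre using Relation.ReflTransGen.head_induction_on with
  | refl => exact ht
  | head hab _ ihb =>
    rename_i a b _
    unfold DStep at hab
    cases hg : (PySem.Dict.mk edges).get? a with
    | none =>
      rw [PySem.Dict.getD_eq_get?_getD, hg] at hab
      simp at hab
    | some ts =>
      rw [PySem.Dict.getD_eq_get?_getD, hg] at hab
      simp only [Option.getD_some] at hab
      exact hstab (a, ts) (get?_mk_mem edges a ts hg) ⟨b, hab, ihb⟩

-- membership in B's reach set decides reachability
theorem bLoop_member_iff (edges : List (Int × List Int)) (hnd : (edges.map Prod.fst).Nodup) (t x : Int) :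
    x ∈ bLoop edges edges.length (PySem.Set.ofList [t]) ↔ Reaches edges x t := by
  have hnd1 : (PySem.Set.ofList [t] : PySem.Set Int).Nodup := PySem.Set.nodup_ofList [t]
  constructor
  · apply bLoop_sound edges hnd t edges.length (PySem.Set.ofList [t])
    intro v hv
    have : v = t := by simpa using hv
    subst this
    exact Relation.ReflTransGen.refl
  · intro hre
    apply stable_complete edges t _ ?hstab ?ht x hre
    case hstab =>
      intro p hp hex
      apply bLoop_stable edges edges.length (PySem.Set.ofList [t]) hnd1 ?_ p hp hex
      have h1 := (edges.map Prod.fst).toFinset_card_le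
      simp only [List.length_map] at h1
      omega
    case ht =>
      exact (bLoop_mono edges edges.length (PySem.Set.ofList [t]) hnd1).1 t (by simp)

-- A's check loop as an `all`
theorem a_check_eq (edges : List (Int × List Int)) (final : Int) (fuel : Nat) :
    ∀ (l : List Int),
      a_check edges final fuel l =
        (if l.all (fun node => node == final ||
            (fp (PySem.Dict.mk edges) final fuel node PySem.Set.empty).1) then some final else none) := by
  intro l
  induction l with
  | nil => simp [a_check]
  | cons node rest ih =>
    by_cases hnf : node = final
    · simp [a_check, hnf, ih]
    · by_cases hfp : (fp (PySem.Dict.mk edges) final fuel node ([] : PySem.Set Int)).1 = true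
      · simp [a_check, hnf, hfp, ih]
      · have hfp' : (fp (PySem.Dict.mk edges) final fuel node ([] : PySem.Set Int)).1 = false := by
          simpa using hfp
        simp [a_check, hnf, hfp']

-- membership in B's candidate fold
theorem mem_foldl_ifadd (d : PySem.Dict Int (List Int)) :
    ∀ (l : List Int) (c : PySem.Set Int) (x : Int),
      x ∈ l.foldl (fun c node => if d.contains node then c else PySem.Set.add c node) c ↔
        x ∈ c ∨ ∃ n ∈ l, d.contains n = false ∧ x = n := by
  intro l
  induction l with
  | nil => intro c x; simp
  | cons node rest ih =>
    intro c x
    simp only [List.foldl_cons]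
    by_cases hc : d.contains node = true
    · rw [if_pos hc, ih]
      constructor
      · rintro (h | ⟨n, hn, hnc, hxe⟩)
        · exact Or.inl h
        · exact Or.inr ⟨n, List.mem_cons_of_mem _ hn, hnc, hxe⟩
      · rintro (h | ⟨n, hn, hnc, hxe⟩)
        · exact Or.inl h
        · subst hxe
          rcases List.mem_cons.mp hn with rfl | hn'
          · rw [hc] at hnc; cases hnc
          · exact Or.inr ⟨x, hn', hnc, rfl⟩
    · have hcf : d.contains node = false := by simpa using hc
      rw [if_neg (by simp [hcf]), ih]
      constructor
      · rintro (h | ⟨n, hn, hnc, hxe⟩)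
        · rcases (PySem.Set.mem_add c node x).mp h with h' | h''
          · exact Or.inl h'
          · exact Or.inr ⟨node, List.mem_cons_self, hcf, h''⟩
        · exact Or.inr ⟨n, List.mem_cons_of_mem _ hn, hnc, hxe⟩
      · rintro (h | ⟨n, hn, hnc, hxe⟩)
        · exact Or.inl ((PySem.Set.mem_add c node x).mpr (Or.inl h))
        · subst hxe
          rcases List.mem_cons.mp hn with rfl | hn'
          · exact Or.inl ((PySem.Set.mem_add c x x).mpr (Or.inr rfl))
          · exact Or.inr ⟨x, hn', hnc, rfl⟩

theorem nodup_foldl_ifadd (d : PySem.Dict Int (List Int)) :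
    ∀ (l : List Int) (c : PySem.Set Int), c.Nodup →
      (l.foldl (fun c node => if d.contains node then c else PySem.Set.add c node) c).Nodup := by
  intro l
  induction l with
  | nil => intro c hc; exact hc
  | cons node rest ih =>
    intro c hc
    simp only [List.foldl_cons]
    by_cases h : d.contains node = true
    · rw [if_pos h]; exact ih c hc
    · rw [if_neg (by simp_all)]
      exact ih _ (PySem.Set.nodup_add c node hc)

-- ===== VERDICT (by name: the statement is the Claim_ definition above) =====
theorem cand_mem (steps : List Int) (edges : List (Int × List Int)) (x : Int) :
    x ∈ PySem.Set.union
        (PySem.Set.ofList (((PySem.Dict.mk edges).items.filter (fun p => p.2.length == 0)).map Prod.fst))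
        (PySem.Set.diff (PySem.Set.ofList (PySem.List.pyRange 0 steps.length 1))
          (PySem.Set.ofList (PySem.Dict.mk edges).keys)) ↔
    x ∈ (PySem.List.pyRange 0 steps.length 1).foldl
        (fun c node => if (PySem.Dict.mk edges).contains node then c else PySem.Set.add c node)
        (PySem.Set.ofList (((PySem.Dict.mk edges).items.filter (fun p => p.2.isEmpty)).map Prod.fst)) := by
  have hfun : (fun p : Int × List Int => p.2.length == 0) = (fun p : Int × List Int => p.2.isEmpty) := by
    funext p
    rw [Bool.eq_iff_iff]
    simp [List.isEmpty_iff, List.length_eq_zero_iff]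
  have hcont : ∀ n : Int, (PySem.Dict.mk edges).contains n = false ↔ n ∉ (PySem.Dict.mk edges).keys := by
    intro n
    constructor
    · intro h hmem
      rw [((PySem.Dict.contains_iff_mem_keys _ n).mpr hmem)] at h
      cases h
    · intro h
      cases hc : (PySem.Dict.mk edges).contains n
      · rfl
      · exact absurd ((PySem.Dict.contains_iff_mem_keys _ n).mp hc) h
  rw [PySem.Set.mem_union, PySem.Set.mem_diff, PySem.Set.mem_ofList, PySem.Set.mem_ofList,
    mem_foldl_ifadd, PySem.Set.mem_ofList, hfun]
  constructor
  · rintro (h | ⟨h1, h2⟩)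
    · exact Or.inl ((PySem.Set.mem_ofList _ x).mpr h)
    · exact Or.inr ⟨x, h1, (hcont x).mpr h2, rfl⟩
  · rintro (h | ⟨n, hn, hnc, hxe⟩)
    · exact Or.inl ((PySem.Set.mem_ofList _ x).mp h)
    · subst hxe
      exact Or.inr ⟨hn, (hcont x).mp hnc⟩

-- ===== final assembly =====
theorem find_final_node_spec : Claim_equal_find_final_node := by
  intro steps edges _ hpre
  show find_final_node steps edges = find_final_node_alt steps edges
  unfold find_final_node find_final_node_alt
  dsimp only
  set CA := PySem.Set.union
      (PySem.Set.ofList (((PySem.Dict.mk edges).items.filter (fun p => p.2.length == 0)).map Prod.fst))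
      (PySem.Set.diff (PySem.Set.ofList (PySem.List.pyRange 0 steps.length 1))
        (PySem.Set.ofList (PySem.Dict.mk edges).keys)) with hCA
  set CB := (PySem.List.pyRange 0 steps.length 1).foldl
      (fun c node => if (PySem.Dict.mk edges).contains node then c else PySem.Set.add c node)
      (PySem.Set.ofList (((PySem.Dict.mk edges).items.filter (fun p => p.2.isEmpty)).map Prod.fst)) with hCB
  have hndA : CA.Nodup := PySem.Set.nodup_union _ _ (PySem.Set.nodup_ofList _)
  have hndB : CB.Nodup := nodup_foldl_ifadd _ _ _ (PySem.Set.nodup_ofList _)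
  have hperm : CA.Perm CB := (List.perm_ext_iff_of_nodup hndA hndB).mpr (cand_mem steps edges)
  have hlen : CA.length = CB.length := hperm.length_eq
  by_cases hone : CB.length = 1
  · obtain ⟨f, hf⟩ := List.length_eq_one_iff.mp hone
    have hA : CA = [f] := List.perm_singleton.mp (hf ▸ hperm)
    rw [hA, hf]
    rw [if_neg (by simp [PySem.Set.len]), if_neg (by simp [PySem.Set.len])]
    show a_check edges ([f] : List Int).headI _ (PySem.Set.ofList (PySem.List.pyRange 0 steps.length 1)) = _
    rw [show ([f] : List Int).headI = f from rfl]
    rw [PySem.Set.ofList_eq_self_of_nodup _ (PySem.List.nodup_pyRange_one 0 steps.length)]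
    rw [a_check_eq]
    have hcond : ((PySem.List.pyRange 0 steps.length 1).all fun node => node == f ||
          (fp (PySem.Dict.mk edges) f ((edges.flatMap Prod.snd).length + 2) node PySem.Set.empty).1) =
        ((PySem.List.pyRange 0 steps.length 1).all fun node =>
          PySem.Set.contains (bLoop edges edges.length (PySem.Set.ofList [f])) node) := by
      rw [Bool.eq_iff_iff, List.all_eq_true, List.all_eq_true]
      constructor
      · intro h node hnode
        rcases (Bool.or_eq_true _ _).mp (h node hnode) with hb | hb
        · have : node = f := by simpa using hb
          subst this
          apply (PySem.Set.contains_iff _ node).mpr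
          exact (bLoop_member_iff edges hpre node node).mpr Relation.ReflTransGen.refl
        · apply (PySem.Set.contains_iff _ node).mpr
          exact (bLoop_member_iff edges hpre f node).mpr ((fp_true_iff edges f node).mp hb)
      · intro h node hnode
        have hmem := (PySem.Set.contains_iff _ node).mp (h node hnode)
        have hre := (bLoop_member_iff edges hpre f node).mp hmem
        exact (Bool.or_eq_true _ _).mpr (Or.inr ((fp_true_iff edges f node).mpr hre))
    rw [hcond]
  · rw [if_pos, if_pos]
    · show (PySem.Set.len CB : Int) ≠ 1
      simp only [PySem.Set.len]
      omega
    · show (PySem.Set.len CA : Int) ≠ 1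
      simp only [PySem.Set.len]
      omega
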